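-- pv_equiv track=rewrite | github.com/RameshAditya/competitive-programming | Competitions/MAR17/SCHEDULEP4.py | calc
-- ===== SOURCE A (Python) =====
-- def calc(s,n):
--     i=0
--     maxi=[]
--     while i<n:
--         j=1
--         while(i+j<n and s[i]==s[i+j]):
--             j+=1
--         maxi.append(j)
--         i+=j-1
--         i+=1
--     return max(maxi)
-- ===== SOURCE B (Python) =====
-- def calc(s, n):
--     starts = [i for i in range(n) if i == 0 or s[i] != s[i - 1]] + [n]
--     return max(b - a for a, b in zip(starts, starts[1:]))
-- ===== Notes on version B (the rewrite author's own statement) =====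
-- stated objective: alternative
-- what changed: Replaced A's nested while loops (inner loop measuring each run, run lengths appended to a list, max at the end) by a comprehension collecting the run-start boundary indices and a max over adjacent differences of that boundary list.
import Mathlib
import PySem

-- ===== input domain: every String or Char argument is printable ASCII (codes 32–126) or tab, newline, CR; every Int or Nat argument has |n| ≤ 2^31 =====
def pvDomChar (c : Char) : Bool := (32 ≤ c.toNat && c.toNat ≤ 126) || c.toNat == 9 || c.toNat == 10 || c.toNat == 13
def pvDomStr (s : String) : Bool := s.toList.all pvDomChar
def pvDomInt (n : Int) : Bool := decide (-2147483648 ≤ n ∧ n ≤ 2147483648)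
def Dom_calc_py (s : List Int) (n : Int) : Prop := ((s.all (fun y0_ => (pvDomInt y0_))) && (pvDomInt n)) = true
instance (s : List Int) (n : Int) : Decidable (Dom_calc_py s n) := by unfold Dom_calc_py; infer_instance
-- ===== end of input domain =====

-- B replaces A's nested while loops (inner run-measuring loop + list of run lengths + final max)
-- by a comprehension collecting the run-start boundaries and a max over adjacent differences (objective: alternative).

-- ===== PORT A =====
-- inner while: while i+j<n and s[i]==s[i+j]: j+=1   (fuel-bounded transliteration)
def calcPyInner (s : List Int) (n i : Int) (j : Int) (fuel : Nat) : Int :=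
  match fuel with
  | 0 => j
  | f + 1 =>
    if i + j < n ∧ PySem.List.pyGet? s i = PySem.List.pyGet? s (i + j) then
      calcPyInner s n i (j + 1) f
    else j

-- outer while: while i<n: …; maxi.append(j); i+=j-1; i+=1
def calcPyOuter (s : List Int) (n i : Int) (maxi : List Int) (fuel : Nat) : List Int :=
  match fuel with
  | 0 => maxi
  | f + 1 =>
    if i < n then
      let j := calcPyInner s n i 1 (n - i).toNat
      calcPyOuter s n (i + (j - 1) + 1) (maxi ++ [j]) f
    else maxi

def calc_py (s : List Int) (n : Int) : Int :=
  (PySem.List.max? (calcPyOuter s n 0 [] n.toNat) (fun y => y)).getD 0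

-- ===== PORT B =====
-- the comprehension's filter condition: i == 0 or s[i] != s[i-1]
def isStart (s : List Int) (i : Int) : Bool :=
  decide (i = 0) || !(PySem.List.pyGet? s i == PySem.List.pyGet? s (i - 1))

-- starts[1:] is ported as .drop 1 (exact for a Python list slice [1:]);
-- max(...) over the generator is max?; .getD 0 totalises (Python raises ValueError there, excluded by Pre_)
def calc_py_alt (s : List Int) (n : Int) : Int :=
  let starts := ((PySem.List.pyRange 0 n 1).filter (isStart s)) ++ [n]
  (PySem.List.max? ((starts.zip (starts.drop 1)).map (fun p => p.2 - p.1)) (fun y => y)).getD 0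

-- ===== PRECONDITION & SPEC =====
-- A raises ValueError (max of empty list) when n ≤ 0 and IndexError when n > len(s).
def Pre_calc_py (s : List Int) (n : Int) : Prop := 0 < n ∧ n ≤ (s.length : Int)
instance (s : List Int) (n : Int) : Decidable (Pre_calc_py s n) := by unfold Pre_calc_py; infer_instance
def pvWitness_calc_py : List Int × Int := ([1, 1, 2], 3)

def Spec_calc_py (s : List Int) (n : Int) (out : Int) : Prop := out = calc_py_alt s n
instance (s : List Int) (n : Int) (out : Int) : Decidable (Spec_calc_py s n out) := by unfold Spec_calc_py; infer_instance

-- ===== CLAIM (what is proved, stated in full; the proofs are below) =====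
def Claim_equal_calc_py : Prop := ∀ (s : List Int) (n : Int), Dom_calc_py s n → Pre_calc_py s n → Spec_calc_py s n (calc_py s n)

-- ===== LEMMAS AND PROOFS =====

-- length of the run of elements equal to c at the head of the list
def headRun (c : Int) : List Int → Nat
  | [] => 0
  | x :: t => if x = c then headRun c t + 1 else 0

-- the list of run lengths, as A's maxi list builds it
def runsList : List Int → List Int
  | [] => []
  | c :: t => ((headRun c t : Int) + 1) :: runsList (t.drop (headRun c t))
  termination_by l => l.length
  decreasing_by simp

theorem calcPyInner_eq (s : List Int) (n : Int) :
    ∀ (fuel : Nat) (i j : Int), 0 ≤ i → i < n → n ≤ (s.length : Int) → 1 ≤ j →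
      (n - i - j).toNat ≤ fuel →
      calcPyInner s n i j fuel
        = j + (headRun ((PySem.List.pyGet? s i).getD 0) ((s.take n.toNat).drop (i + j).toNat) : Int) := by
  intro fuel
  induction fuel with
  | zero =>
    intro i j h0 hin hlen hj hfuel
    have hd : ((s.take n.toNat).drop (i + j).toNat) = [] := by
      apply List.drop_eq_nil_of_le
      simp
      omega
    simp [calcPyInner, hd, headRun]
  | succ f ih =>
    intro i j h0 hin hlen hj hfuel
    have hi : i.toNat < s.length := by omega
    have hgi : PySem.List.pyGet? s i = some s[i.toNat] :=
      PySem.List.pyGet?_eq_some_getElem s h0 (by omega)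
    by_cases hb : i + j < n
    · have hijn : (i + j).toNat < s.length := by omega
      have hgij : PySem.List.pyGet? s (i + j) = some s[(i + j).toNat] :=
        PySem.List.pyGet?_eq_some_getElem s (by omega) (by omega)
      have hijt : (i + j).toNat < (s.take n.toNat).length := by
        simp; omega
      have hd : (s.take n.toNat).drop (i + j).toNat
          = (s.take n.toNat)[(i + j).toNat] :: (s.take n.toNat).drop ((i + j).toNat + 1) :=
        List.drop_eq_getElem_cons hijt
      have hel : (s.take n.toNat)[(i + j).toNat] = s[(i + j).toNat] := by
        simp [List.getElem_take]
      by_cases heq : s[(i + j).toNat] = s[i.toNat]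
      · rw [calcPyInner, if_pos ⟨hb, by rw [hgi, hgij, heq]⟩]
        rw [ih i (j + 1) h0 hin hlen (by omega) (by omega)]
        rw [hgi, hd, hel]
        simp [headRun, heq]
        have : (i + (j + 1)).toNat = (i + j).toNat + 1 := by omega
        rw [this]
        ring
      · rw [calcPyInner, if_neg (by
          intro hc
          rw [hgi, hgij] at hc
          exact heq (by injection hc.2 with h; exact h.symm))]
        rw [hgi, hd, hel]
        simp [headRun, heq]
    · rw [calcPyInner, if_neg (by intro hc; exact hb hc.1)]
      have hd : ((s.take n.toNat).drop (i + j).toNat) = [] := by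
        apply List.drop_eq_nil_of_le
        simp
        omega
      simp [hd, headRun]

theorem calcPyOuter_eq (s : List Int) (n : Int) :
    ∀ (fuel : Nat) (i : Int) (maxi : List Int), 0 ≤ i → n ≤ (s.length : Int) →
      (n - i).toNat ≤ fuel →
      calcPyOuter s n i maxi fuel = maxi ++ runsList ((s.take n.toNat).drop i.toNat) := by
  intro fuel
  induction fuel with
  | zero =>
    intro i maxi h0 hlen hfuel
    have hd : ((s.take n.toNat).drop i.toNat) = [] := by
      apply List.drop_eq_nil_of_le
      simp
      omega
    simp [calcPyOuter, hd, runsList]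
  | succ f ih =>
    intro i maxi h0 hlen hfuel
    by_cases hb : i < n
    · have hgi : PySem.List.pyGet? s i = some s[i.toNat] :=
        PySem.List.pyGet?_eq_some_getElem s h0 (by omega)
      have hj : calcPyInner s n i 1 (n - i).toNat
          = 1 + (headRun ((PySem.List.pyGet? s i).getD 0) ((s.take n.toNat).drop (i + 1).toNat) : Int) :=
        calcPyInner_eq s n (n - i).toNat i 1 h0 hb hlen le_rfl (by omega)
      have hit : i.toNat < (s.take n.toNat).length := by simp; omega
      have hd : (s.take n.toNat).drop i.toNat
          = (s.take n.toNat)[i.toNat] :: (s.take n.toNat).drop (i.toNat + 1) :=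
        List.drop_eq_getElem_cons hit
      have hel : (s.take n.toNat)[i.toNat] = s[i.toNat] := by simp [List.getElem_take]
      have hi1 : (i + 1).toNat = i.toNat + 1 := by omega
      rw [calcPyOuter, if_pos hb]
      simp only [hj, hgi, Option.getD_some, hi1]
      set hr : Nat := headRun s[i.toNat] ((s.take n.toNat).drop (i.toNat + 1)) with hhr
      have harith : i + (1 + (hr : Int) - 1) + 1 = i + (1 + (hr : Int)) := by ring
      rw [harith, ih (i + (1 + (hr : Int))) (maxi ++ [1 + (hr : Int)]) (by omega) hlen (by omega)]
      have hdd : (s.take n.toNat).drop (i + (1 + (hr : Int))).toNat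
          = ((s.take n.toNat).drop (i.toNat + 1)).drop hr := by
        rw [List.drop_drop]
        congr 1
        omega
      rw [hdd, hd, runsList, hel, ← hhr]
      have h1hr : (1 + (hr : Int)) = (hr : Int) + 1 := by ring
      rw [h1hr]
      simp
    · have hd : ((s.take n.toNat).drop i.toNat) = [] := by
        apply List.drop_eq_nil_of_le
        simp
        omega
      simp [calcPyOuter, hb, hd, runsList]

-- helper views of the Python expressions
def zipDiffs (xs : List Int) : List Int := (xs.zip (xs.drop 1)).map (fun p => p.2 - p.1)

theorem zipDiffs_cons₂ (a b : Int) (t : List Int) :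
    zipDiffs (a :: b :: t) = (b - a) :: zipDiffs (b :: t) := by
  simp [zipDiffs]

theorem headRun_le (c : Int) : ∀ t : List Int, headRun c t ≤ t.length := by
  intro t
  induction t with
  | nil => simp [headRun]
  | cons x t' ih => by_cases h : x = c <;> simp [headRun, h] <;> omega

theorem headRun_getElem? (c : Int) : ∀ (t : List Int) (m : Nat), m < headRun c t → t[m]? = some c := by
  intro t
  induction t with
  | nil => intro m hm; simp [headRun] at hm
  | cons x t' ih =>
    intro m hm
    by_cases h : x = c
    · cases m with
      | zero => simp [h]
      | succ m' =>
        simp only [headRun, if_pos h] at hm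
        simpa using ih m' (by omega)
    · simp [headRun, h] at hm

theorem headRun_stop (c : Int) : ∀ t : List Int, headRun c t < t.length → t[headRun c t]? ≠ some c := by
  intro t
  induction t with
  | nil => intro h; simp at h
  | cons x t' ih =>
    intro h
    by_cases hx : x = c
    · simp only [headRun, if_pos hx, List.length_cons] at h ⊢
      simpa using ih (by omega)
    · simp [headRun, hx]

theorem filter_skip_run (s : List Int) (n : Int) (h2 : n ≤ (s.length : Int)) :
    ∀ (k : Nat) (i : Int), 0 ≤ i → i < n →
      headRun ((PySem.List.pyGet? s i).getD 0) ((s.take n.toNat).drop (i + 1).toNat) = k →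
      (PySem.List.pyRange (i + 1) n 1).filter (isStart s)
        = (PySem.List.pyRange (i + 1 + k) n 1).filter (isStart s) := by
  intro k
  induction k with
  | zero => intro i h0 hin hh; norm_num
  | succ k ih =>
    intro i h0 hin hh
    have hgi : PySem.List.pyGet? s i = some s[i.toNat] :=
      PySem.List.pyGet?_eq_some_getElem s h0 (by omega)
    rw [hgi, Option.getD_some] at hh
    have hlen1 : ((s.take n.toNat).drop (i + 1).toNat).length = n.toNat - (i + 1).toNat := by
      simp
      omega
    have hle := headRun_le s[i.toNat] ((s.take n.toNat).drop (i + 1).toNat)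
    have hi1n : i + 1 < n := by omega
    have hhead : ((s.take n.toNat).drop (i + 1).toNat)[0]? = some s[i.toNat] :=
      headRun_getElem? _ _ 0 (by omega)
    rw [List.getElem?_drop, List.getElem?_take_of_lt (by omega)] at hhead
    · have hi1l : (i + 1).toNat < s.length := by omega
      rw [show (i + 1).toNat + 0 = (i + 1).toNat by omega,
          List.getElem?_eq_getElem (by omega)] at hhead
      have heq1 : s[(i + 1).toNat] = s[i.toNat] := by
        injection hhead
      have hg1 : PySem.List.pyGet? s (i + 1) = some s[(i + 1).toNat] :=
        PySem.List.pyGet?_eq_some_getElem s (by omega) (by omega)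
      have hfalse : isStart s (i + 1) = false := by
        unfold isStart
        have : i + 1 - 1 = i := by ring
        rw [this, hg1, hgi, heq1]
        simp
        omega
      rw [PySem.List.pyRange_one_cons hi1n, List.filter_cons, hfalse]
      simp only [Bool.false_eq_true, if_false]
      have hh' : headRun ((PySem.List.pyGet? s (i + 1)).getD 0) ((s.take n.toNat).drop (i + 1 + 1).toNat) = k := by
        rw [hg1, Option.getD_some, heq1]
        have hdd : (s.take n.toNat).drop (i + 1).toNat
            = s[(i + 1).toNat] :: (s.take n.toNat).drop ((i + 1).toNat + 1) := by
          rw [List.drop_eq_getElem_cons (by simp; omega)]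
          congr 1
          simp [List.getElem_take]
        rw [hdd, heq1] at hh
        simp [headRun] at hh
        have : (i + 1 + 1).toNat = (i + 1).toNat + 1 := by omega
        rw [this]
        omega
      rw [ih (i + 1) (by omega) hi1n hh']
      congr 2
      push_cast
      ring

theorem filter_diffs (s : List Int) (n : Int) (h2 : n ≤ (s.length : Int)) :
    ∀ (fuel : Nat) (i : Int), 0 ≤ i → i < n → (n - i).toNat ≤ fuel → isStart s i = true →
      zipDiffs (((PySem.List.pyRange i n 1).filter (isStart s)) ++ [n])
        = runsList ((s.take n.toNat).drop i.toNat) := by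
  intro fuel
  induction fuel with
  | zero => intro i h0 hin hfuel hst; omega
  | succ f ih =>
    intro i h0 hin hfuel hst
    have hgi : PySem.List.pyGet? s i = some s[i.toNat] :=
      PySem.List.pyGet?_eq_some_getElem s h0 (by omega)
    set c : Int := s[i.toNat]'(by omega) with hc
    set hr : Nat := headRun c ((s.take n.toNat).drop (i + 1).toNat) with hhr
    have hskip := filter_skip_run s n h2 hr i h0 hin (by rw [hgi, Option.getD_some, ← hhr])
    clear_value c hr
    have hlen1 : ((s.take n.toNat).drop (i + 1).toNat).length = n.toNat - (i + 1).toNat := by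
      simp
      omega
    have hle := headRun_le c ((s.take n.toNat).drop (i + 1).toNat)
    have hj_le : i + 1 + (hr : Int) ≤ n := by omega
    have hit : i.toNat < (s.take n.toNat).length := by simp; omega
    have hd : (s.take n.toNat).drop i.toNat
        = s[i.toNat] :: (s.take n.toNat).drop (i.toNat + 1) := by
      rw [List.drop_eq_getElem_cons hit]
      congr 1
      simp [List.getElem_take]
    have hi1 : (i + 1).toNat = i.toNat + 1 := by omega
    have hdropj : ((s.take n.toNat).drop (i.toNat + 1)).drop hr
        = (s.take n.toNat).drop (i + 1 + (hr : Int)).toNat := by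
      rw [List.drop_drop]
      congr 1
      omega
    have hruns : runsList ((s.take n.toNat).drop i.toNat)
        = ((hr : Int) + 1) :: runsList ((s.take n.toNat).drop (i + 1 + (hr : Int)).toNat) := by
      rw [hd, runsList, ← hdropj]
      congr 2 <;> rw [← hc, ← hi1, ← hhr]
    rw [PySem.List.pyRange_one_cons hin, List.filter_cons, hst, if_pos rfl, List.cons_append,
        hskip, hruns]
    by_cases hjn : i + 1 + (hr : Int) < n
    · -- the next run starts at i+1+hr, which passes the filter
      have hj0 : 0 ≤ i + 1 + (hr : Int) := by omega
      have hgj : PySem.List.pyGet? s (i + 1 + (hr : Int)) = some s[(i + 1 + (hr : Int)).toNat] :=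
        PySem.List.pyGet?_eq_some_getElem s hj0 (by omega)
      -- s[i+hr] = c (last element of the run)
      have hprev? : s[(i + (hr : Int)).toNat]? = some c := by
        cases hk : hr with
        | zero =>
          have hix : (i + ((0 : Nat) : Int)).toNat = i.toNat := by omega
          rw [hix, List.getElem?_eq_getElem (by omega)]
          exact congrArg some hc.symm
        | succ m =>
          have hgm : ((s.take n.toNat).drop (i + 1).toNat)[m]? = some c :=
            headRun_getElem? _ _ m (by omega)
          rw [List.getElem?_drop, List.getElem?_take_of_lt (by omega)] at hgm
          have hix : (i + 1).toNat + m = (i + ((m + 1 : Nat) : Int)).toNat := by omega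
          rw [hix] at hgm
          exact hgm
      have hprev : s[(i + (hr : Int)).toNat]'(by omega) = c := by
        rw [List.getElem?_eq_getElem (by omega)] at hprev?
        injection hprev?
    -- s[i+1+hr] ≠ c (the run stops there)
      have hstop0 : ((s.take n.toNat).drop (i + 1).toNat)[hr]? ≠ some c := by
        rw [hhr]
        exact headRun_stop c _ (by omega)
      rw [List.getElem?_drop, List.getElem?_take_of_lt (by omega)] at hstop0
      have hstop : s[(i + 1 + (hr : Int)).toNat]'(by omega) ≠ c := by
        intro hcc
        apply hstop0
        rw [List.getElem?_eq_getElem (show (i + 1).toNat + hr < s.length by omega)]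
        have hix : (i + 1).toNat + hr = (i + 1 + (hr : Int)).toNat := by omega
        simp [hix, hcc]
      have hpe : i + 1 + (hr : Int) - 1 = i + (hr : Int) := by ring
      have hgp : PySem.List.pyGet? s (i + (hr : Int)) = some s[(i + (hr : Int)).toNat] :=
        PySem.List.pyGet?_eq_some_getElem s (by omega) (by omega)
      have hstj : isStart s (i + 1 + (hr : Int)) = true := by
        unfold isStart
        rw [hpe, hgj, hgp, hprev]
        simp
        exact Or.inr hstop
      have hcons : (PySem.List.pyRange (i + 1 + (hr : Int)) n 1).filter (isStart s)
          = (i + 1 + (hr : Int)) :: (PySem.List.pyRange (i + 1 + (hr : Int) + 1) n 1).filter (isStart s) := by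
        rw [PySem.List.pyRange_one_cons hjn, List.filter_cons, hstj, if_pos rfl]
      rw [hcons, List.cons_append, zipDiffs_cons₂, ← List.cons_append, ← hcons,
          ih (i + 1 + (hr : Int)) hj0 hjn (by omega) hstj]
      congr 1
      ring
    · -- the run reaches n: starts = [i, n], single run of length n - i
      have hjn' : i + 1 + (hr : Int) = n := by omega
      rw [hjn', PySem.List.pyRange_one_eq_nil le_rfl]
      simp only [List.filter_nil, List.nil_append]
      have hdn : (s.take n.toNat).drop n.toNat = [] := by
        apply List.drop_eq_nil_of_le
        simp
      rw [hdn, runsList, zipDiffs_cons₂]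
      simp [zipDiffs]
      omega

-- ===== VERDICT (by name: the statement is the Claim_ definition above) =====
theorem calc_py_spec : Claim_equal_calc_py := by
  intro s n _ hpre
  obtain ⟨h1, h2⟩ := hpre
  unfold Spec_calc_py calc_py calc_py_alt
  rw [calcPyOuter_eq s n n.toNat 0 [] le_rfl h2 (by omega)]
  have hst0 : isStart s 0 = true := by unfold isStart; simp
  have hmain := filter_diffs s n h2 n.toNat 0 le_rfl h1 (by omega) hst0
  rw [show (0 : Int).toNat = 0 from rfl, List.drop_zero] at hmain
  rw [List.nil_append, show (0 : Int).toNat = 0 from rfl, List.drop_zero]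
  show (PySem.List.max? (runsList (s.take n.toNat)) (fun y => y)).getD 0
      = (PySem.List.max? (zipDiffs (((PySem.List.pyRange 0 n 1).filter (isStart s)) ++ [n])) (fun y => y)).getD 0
  rw [hmain]
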